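-- pv_equiv track=rewrite | github.com/yvonneban/SpectralLineReduction | lmtslr/utils/roach_file_utils.py | create_roach_list
-- ===== SOURCE A (Python) =====
-- roach_pixels_all = [[0,1,2,3],[4,5,6,7],[8,9,10,11],[12,13,14,15]]
--
-- def find_roach_from_pixel(pixel_id):
--     """
--     Returns roach number on which target pixel is located.
--     Args:
--         pixel_id (int): target pixel number
--     Returns:
--         i (int): roach number on which target pixel is located
--     """
--     for i, lis in enumerate(roach_pixels_all):
--         if pixel_id in lis:
--             return [i]
--     return []
--
-- def create_roach_list(pixel_list):
--     """
--     Returns list of roach boards to be read given a list of pixels.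
--     Args:
--         pixel_list (list): list of target pixels
--     Returns:
--         roach_list (list): list of roach boards to be read
--     """
--     rid = [0, 0, 0, 0]
--     for pixel_id in pixel_list:
--         r = find_roach_from_pixel(pixel_id)
--         if r != []:
--             rid[r[0]] = 1
--     roach_list = []
--     for i in range(4):
--         if rid[i] == 1:
--             roach_list.append('roach%d' % (i))
--     return roach_list
-- ===== SOURCE B (Python) =====
-- def create_roach_list(pixel_list):
--     # Invert the loops: per board, one arithmetic range test over the pixels;
--     # no lookup table, no flag array.
--     return ['roach%d' % i
--             for i in range(4)
--             if any(p in range(4 * i, 4 * i + 4) for p in pixel_list)]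
-- ===== Notes on version B (the rewrite author's own statement) =====
-- stated objective: simpler
-- what changed: Replaced the per-pixel scan of a fixed lookup table plus a flag array with a single comprehension over the four boards, each tested by an arithmetic range membership any() over the pixels.
import Mathlib
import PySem

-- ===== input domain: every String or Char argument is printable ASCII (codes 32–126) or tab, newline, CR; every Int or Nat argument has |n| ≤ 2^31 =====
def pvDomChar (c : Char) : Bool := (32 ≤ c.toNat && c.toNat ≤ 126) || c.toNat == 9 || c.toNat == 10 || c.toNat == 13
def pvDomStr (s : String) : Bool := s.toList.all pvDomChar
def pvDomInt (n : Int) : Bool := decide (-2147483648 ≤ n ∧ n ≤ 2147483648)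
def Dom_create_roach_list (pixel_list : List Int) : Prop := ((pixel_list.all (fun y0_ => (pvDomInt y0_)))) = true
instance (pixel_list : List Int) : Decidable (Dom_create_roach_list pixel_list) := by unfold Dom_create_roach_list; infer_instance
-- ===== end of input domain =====

-- B inverts the loops: one comprehension over the four boards, each tested by an
-- arithmetic range membership over the pixels (simpler; no lookup table, no flag array).

-- ===== PORT A =====
def roach_pixels_all : List (List Int) := [[0,1,2,3],[4,5,6,7],[8,9,10,11],[12,13,14,15]]

-- the 'for i, lis in enumerate(...)' loop with early return
def findLoop (pixel_id : Int) : List (Int × List Int) → List Int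
  | [] => []
  | (i, lis) :: rest => if lis.contains pixel_id then [i] else findLoop pixel_id rest

def find_roach_from_pixel (pixel_id : Int) : List Int :=
  findLoop pixel_id (PySem.List.enumerate roach_pixels_all)

-- first loop of create_roach_list: rid[r[0]] = 1 (r[0] is a valid index 0..3 here,
-- so List.set on its toNat is exact Python list assignment)
def ridLoop (rid : List Int) : List Int → List Int
  | [] => rid
  | p :: rest =>
      let r := find_roach_from_pixel p
      if r ≠ [] then ridLoop (rid.set (r.headD 0).toNat 1) rest else ridLoop rid rest

def create_roach_list (pixel_list : List Int) : List String :=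
  let rid := ridLoop [0, 0, 0, 0] pixel_list
  -- second loop: for i in range(4): if rid[i] == 1: append 'roach%d' % i
  -- (i is 0..3, in range of rid, so getD is exact Python indexing)
  (PySem.List.pyRange 0 4 1).foldl
    (fun acc i => if rid.getD i.toNat 0 == 1 then acc ++ ["roach" ++ PySem.Int.toStr i] else acc) []

-- ===== PORT B =====
def create_roach_list_alt (pixel_list : List Int) : List String :=
  ((PySem.List.pyRange 0 4 1).filter
      (fun i => pixel_list.any (fun p => 4 * i ≤ p && p < 4 * i + 4))).map
    (fun i => "roach" ++ PySem.Int.toStr i)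

-- ===== PRECONDITION & SPEC =====
def Spec_create_roach_list (pixel_list : List Int) (out : List String) : Prop := out = create_roach_list_alt pixel_list
instance (pixel_list : List Int) (out : List String) : Decidable (Spec_create_roach_list pixel_list out) := by unfold Spec_create_roach_list; infer_instance

-- ===== CLAIM (what is proved, stated in full; the proofs are below) =====
def Claim_equal_create_roach_list : Prop := ∀ (pixel_list : List Int), Dom_create_roach_list pixel_list → Spec_create_roach_list pixel_list (create_roach_list pixel_list)

-- ===== LEMMAS AND PROOFS =====

-- membership test of B, per board
def hitB (i : Int) (l : List Int) : Bool := l.any (fun p => 4 * i ≤ p && p < 4 * i + 4)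

lemma hitB_cons_true {i p : Int} (rest : List Int) (h : 4 * i ≤ p ∧ p < 4 * i + 4) :
    hitB i (p :: rest) = true := by
  simp [hitB, List.any_cons, h.1, h.2]

lemma hitB_cons_false {i p : Int} (rest : List Int) (h : ¬ (4 * i ≤ p ∧ p < 4 * i + 4)) :
    hitB i (p :: rest) = hitB i rest := by
  simp only [hitB, List.any_cons]
  have : (decide (4 * i ≤ p) && decide (p < 4 * i + 4)) = false := by
    simp only [Bool.and_eq_false_iff, decide_eq_false_iff_not]; omega
  rw [this]; simp

lemma ridLoop_char (l : List Int) (a b c d : Int) :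
    ridLoop [a, b, c, d] l =
      [if hitB 0 l then 1 else a, if hitB 1 l then 1 else b,
       if hitB 2 l then 1 else c, if hitB 3 l then 1 else d] := by
  induction l generalizing a b c d with
  | nil => simp [ridLoop, hitB]
  | cons p rest ih =>
      have hfind : find_roach_from_pixel p =
          if 0 ≤ p ∧ p < 4 then [0] else if 4 ≤ p ∧ p < 8 then [1]
          else if 8 ≤ p ∧ p < 12 then [2] else if 12 ≤ p ∧ p < 16 then [3] else [] := by
        simp only [find_roach_from_pixel, roach_pixels_all, PySem.List.enumerate,
          findLoop, List.contains]
        split_ifs <;> simp_all <;> omega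
      by_cases h0 : 0 ≤ p ∧ p < 4
      · have hf : find_roach_from_pixel p = [0] := by rw [hfind, if_pos h0]
        rw [show ridLoop [a, b, c, d] (p :: rest) = ridLoop [1, b, c, d] rest from by
              simp [ridLoop, hf],
          ih, hitB_cons_true rest (by omega),
          hitB_cons_false (i := 1) rest (by omega),
          hitB_cons_false (i := 2) rest (by omega),
          hitB_cons_false (i := 3) rest (by omega)]
        simp
      · by_cases h1 : 4 ≤ p ∧ p < 8
        · have hf : find_roach_from_pixel p = [1] := by
            rw [hfind, if_neg h0, if_pos h1]
          rw [show ridLoop [a, b, c, d] (p :: rest) = ridLoop [a, 1, c, d] rest from by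
                simp [ridLoop, hf],
            ih, hitB_cons_true (i := 1) rest (by omega),
            hitB_cons_false (i := 0) rest (by omega),
            hitB_cons_false (i := 2) rest (by omega),
            hitB_cons_false (i := 3) rest (by omega)]
          simp
        · by_cases h2 : 8 ≤ p ∧ p < 12
          · have hf : find_roach_from_pixel p = [2] := by
              rw [hfind, if_neg h0, if_neg h1, if_pos h2]
            rw [show ridLoop [a, b, c, d] (p :: rest) = ridLoop [a, b, 1, d] rest from by
                  simp [ridLoop, hf],
              ih, hitB_cons_true (i := 2) rest (by omega),
              hitB_cons_false (i := 0) rest (by omega),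
              hitB_cons_false (i := 1) rest (by omega),
              hitB_cons_false (i := 3) rest (by omega)]
            simp
          · by_cases h3 : 12 ≤ p ∧ p < 16
            · have hf : find_roach_from_pixel p = [3] := by
                rw [hfind, if_neg h0, if_neg h1, if_neg h2, if_pos h3]
              rw [show ridLoop [a, b, c, d] (p :: rest) = ridLoop [a, b, c, 1] rest from by
                    simp [ridLoop, hf],
                ih, hitB_cons_true (i := 3) rest (by omega),
                hitB_cons_false (i := 0) rest (by omega),
                hitB_cons_false (i := 1) rest (by omega),
                hitB_cons_false (i := 2) rest (by omega)]
              simp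
            · have hf : find_roach_from_pixel p = [] := by
                rw [hfind, if_neg h0, if_neg h1, if_neg h2, if_neg h3]
              rw [show ridLoop [a, b, c, d] (p :: rest) = ridLoop [a, b, c, d] rest from by
                    simp [ridLoop, hf],
                ih, hitB_cons_false (i := 0) rest (by omega),
                hitB_cons_false (i := 1) rest (by omega),
                hitB_cons_false (i := 2) rest (by omega),
                hitB_cons_false (i := 3) rest (by omega)]

lemma claim_aux : ∀ (l : List Int), create_roach_list l = create_roach_list_alt l := by
  intro l
  have hr : PySem.List.pyRange 0 4 1 = [0, 1, 2, 3] := by decide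
  simp only [create_roach_list, create_roach_list_alt, ridLoop_char, hr]
  have e : ∀ i : Int, (l.any fun p => 4 * i ≤ p && p < 4 * i + 4) = hitB i l := by
    intro i; rfl
  simp only [List.filter, List.foldl, e]
  by_cases h0 : hitB 0 l <;> by_cases h1 : hitB 1 l <;> by_cases h2 : hitB 2 l <;>
    by_cases h3 : hitB 3 l <;>
    simp [h0, h1, h2, h3]
-- ===== VERDICT (by name: the statement is the Claim_ definition above) =====
theorem create_roach_list_spec : Claim_equal_create_roach_list := by
  intro l _
  unfold Spec_create_roach_list
  exact claim_aux l
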